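-- pv_equiv track=rewrite | github.com/Nenavathnaresh/Python_DSA | DP-Problems/Medium/distinct-coloring.py | distinctColoring
-- ===== SOURCE A (Python) =====
-- def distinctColoring(N, r, g, b):
--     # Base case for the first house
--     dp_red = r[0]  # Cost of painting the first house red
--     dp_green = g[0]  # Cost of painting the first house green
--     dp_blue = b[0]  # Cost of painting the first house blue
--
--     # Iterate through the remaining houses
--     for i in range(1, N):
--         # Calculate the cost for each color for house i
--         new_red = r[i] + min(dp_green, dp_blue)  # Red cost for current house
--         new_green = g[i] + min(dp_red, dp_blue)  # Green cost for current house
--         new_blue = b[i] + min(dp_red, dp_green)  # Blue cost for current house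
--
--         # Update the DP variables for the next iteration
--         dp_red, dp_green, dp_blue = new_red, new_green, new_blue
--
--     # The final answer will be the minimum cost of the last house being any color
--     return min(dp_red, dp_green, dp_blue)
-- ===== SOURCE B (Python) =====
-- def distinctColoring(N, r, g, b):
--     # Divide-and-conquer product of min-plus 3x3 transition matrices.
--     # M[p][c] = cost of painting the current house color c when the previous
--     # house has color p (None = forbidden transition / +infinity).
--     def add(x, y):
--         return None if x is None or y is None else x + y
--
--     def mn(x, y):
--         if x is None:
--             return y
--         if y is None:
--             return x
--         return min(x, y)
--
--     def mul(P, Q):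
--         return tuple(tuple(mn(mn(add(P[p][0], Q[0][q]), add(P[p][1], Q[1][q])),
--                               add(P[p][2], Q[2][q]))
--                            for q in range(3))
--                      for p in range(3))
--
--     IDENT = ((0, None, None), (None, 0, None), (None, None, 0))
--
--     def step(i):
--         c = (r[i], g[i], b[i])
--         return tuple(tuple(None if q == p else c[q] for q in range(3))
--                      for p in range(3))
--
--     def prod(lo, hi):
--         if hi - lo <= 0:
--             return IDENT
--         if hi - lo == 1:
--             return step(lo)
--         mid = lo + (hi - lo) // 2
--         return mul(prod(lo, mid), prod(mid, hi))
--
--     M = prod(1, N)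
--     v = (r[0], g[0], b[0])
--     w = [mn(mn(add(v[0], M[0][q]), add(v[1], M[1][q])), add(v[2], M[2][q]))
--          for q in range(3)]
--     return min(x for x in w if x is not None)
-- ===== Notes on version B (the rewrite author's own statement) =====
-- stated objective: alternative
-- what changed: Replaces the rolling three-variable DP scan with a divide-and-conquer product of min-plus (tropical) 3x3 transition matrices over the houses, with None as +infinity; the answer is the start-cost vector multiplied through the combined matrix.
import Mathlib
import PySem

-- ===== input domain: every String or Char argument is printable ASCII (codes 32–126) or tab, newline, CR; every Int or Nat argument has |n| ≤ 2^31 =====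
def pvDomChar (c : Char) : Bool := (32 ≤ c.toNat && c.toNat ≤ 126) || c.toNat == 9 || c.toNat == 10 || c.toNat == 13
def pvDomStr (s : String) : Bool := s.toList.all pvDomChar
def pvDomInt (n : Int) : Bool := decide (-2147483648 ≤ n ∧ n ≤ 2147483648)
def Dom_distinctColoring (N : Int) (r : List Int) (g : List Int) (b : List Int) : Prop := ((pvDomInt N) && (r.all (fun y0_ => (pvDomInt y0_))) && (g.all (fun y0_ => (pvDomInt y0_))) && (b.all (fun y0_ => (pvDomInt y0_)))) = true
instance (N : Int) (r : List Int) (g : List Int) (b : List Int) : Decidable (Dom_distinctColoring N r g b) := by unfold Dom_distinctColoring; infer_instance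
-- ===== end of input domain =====

-- B replaces A's rolling three-variable DP scan by a divide-and-conquer product of
-- min-plus (tropical) 3x3 transition matrices (None = +infinity); same values,
-- proved equal on Pre_ (indices in range).

-- ===== PORT A =====
-- list indexing r[i]: Python raises IndexError out of range; Pre_ guarantees in range,
-- so the default 0 of pyGetD is never used on admitted inputs.
def distinctColoring (N : Int) (r : List Int) (g : List Int) (b : List Int) : Int :=
  let dp0 := (PySem.List.pyGetD r 0 0, PySem.List.pyGetD g 0 0, PySem.List.pyGetD b 0 0)
  let dp := (PySem.List.pyRange 1 N 1).foldl
    (fun (dp : Int × Int × Int) i =>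
      (PySem.List.pyGetD r i 0 + min dp.2.1 dp.2.2,
       PySem.List.pyGetD g i 0 + min dp.1 dp.2.2,
       PySem.List.pyGetD b i 0 + min dp.1 dp.2.1)) dp0
  min (min dp.1 dp.2.1) dp.2.2

-- ===== PORT B =====
-- Source B's Option entries: None = +infinity; Python 3-tuples become nested pairs.
-- Row p of a matrix / entry q of a row is reached by .1/.2.1/.2.2 projections.
def pvRow : Type := Option Int × Option Int × Option Int
def pvMat : Type := pvRow × pvRow × pvRow

-- Source B's add(x, y)
def pvAdd (x y : Option Int) : Option Int :=
  match x, y with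
  | some x, some y => some (x + y)
  | _, _ => none

-- Source B's mn(x, y)
def pvMin (x y : Option Int) : Option Int :=
  match x, y with
  | none, y => y
  | x, none => x
  | some x, some y => some (min x y)

-- Source B's mul(P, Q): entry (p, q) = min over k of P[p][k] + Q[k][q]
def pvMulRow (row : pvRow) (Q : pvMat) : pvRow :=
  (pvMin (pvMin (pvAdd row.1 Q.1.1) (pvAdd row.2.1 Q.2.1.1)) (pvAdd row.2.2 Q.2.2.1),
   pvMin (pvMin (pvAdd row.1 Q.1.2.1) (pvAdd row.2.1 Q.2.1.2.1)) (pvAdd row.2.2 Q.2.2.2.1),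
   pvMin (pvMin (pvAdd row.1 Q.1.2.2) (pvAdd row.2.1 Q.2.1.2.2)) (pvAdd row.2.2 Q.2.2.2.2))

def pvMul (P Q : pvMat) : pvMat :=
  (pvMulRow P.1 Q, pvMulRow P.2.1 Q, pvMulRow P.2.2 Q)

-- Source B's IDENT
def pvIdent : pvMat :=
  ((some 0, none, none), (none, some 0, none), (none, none, some 0))

-- Source B's step(i): M[p][c] = cost of color c at house i, None on the diagonal
def pvStep (r g b : List Int) (i : Int) : pvMat :=
  ((none, some (PySem.List.pyGetD g i 0), some (PySem.List.pyGetD b i 0)),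
   (some (PySem.List.pyGetD r i 0), none, some (PySem.List.pyGetD b i 0)),
   (some (PySem.List.pyGetD r i 0), some (PySem.List.pyGetD g i 0), none))

-- Source B's prod(lo, hi): divide and conquer at the midpoint
def pvProd (r g b : List Int) (lo hi : Int) : pvMat :=
  if _h0 : hi - lo ≤ 0 then pvIdent
  else if _h1 : hi - lo = 1 then pvStep r g b lo
  else
    let mid := lo + PySem.Int.floordiv (hi - lo) 2
    pvMul (pvProd r g b lo mid) (pvProd r g b mid hi)
termination_by (hi - lo).toNat
decreasing_by
  · rw [PySem.Int.floordiv_eq_ediv_of_pos (by omega)]; omega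
  · rw [PySem.Int.floordiv_eq_ediv_of_pos (by omega)]; omega

-- Source B's final comprehension w[q] = mn over p of v[p] + M[p][q]  (= v ⊗ M)
def pvVMul (v : pvRow) (M : pvMat) : pvRow := pvMulRow v M

-- min over the non-None entries of w; under Pre_ some entry is finite, so the
-- pvMin chain is `some` and the default 0 is never used on admitted inputs
-- (Python's min over an empty generator would raise there).
def distinctColoring_alt (N : Int) (r : List Int) (g : List Int) (b : List Int) : Int :=
  let M := pvProd r g b 1 N
  let v : pvRow := (some (PySem.List.pyGetD r 0 0), some (PySem.List.pyGetD g 0 0),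
                    some (PySem.List.pyGetD b 0 0))
  let w := pvVMul v M
  (pvMin (pvMin w.1 w.2.1) w.2.2).getD 0

-- ===== PRECONDITION & SPEC =====
-- Pre_: exactly the inputs where Python A returns (no IndexError): the three cost
-- lists are non-empty (r[0]/g[0]/b[0] are read) and have at least N entries (r[i], i < N).
def Pre_distinctColoring (N : Int) (r : List Int) (g : List Int) (b : List Int) : Prop :=
  r ≠ [] ∧ g ≠ [] ∧ b ≠ [] ∧ N ≤ r.length ∧ N ≤ g.length ∧ N ≤ b.length
instance (N : Int) (r : List Int) (g : List Int) (b : List Int) : Decidable (Pre_distinctColoring N r g b) := by unfold Pre_distinctColoring; infer_instance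
def pvWitness_distinctColoring : Int × List Int × List Int × List Int :=
  (3, [1, 7, 2], [4, 1, 9], [2, 8, 1])

def Spec_distinctColoring (N : Int) (r : List Int) (g : List Int) (b : List Int) (out : Int) : Prop := out = distinctColoring_alt N r g b
instance (N : Int) (r : List Int) (g : List Int) (b : List Int) (out : Int) : Decidable (Spec_distinctColoring N r g b out) := by unfold Spec_distinctColoring; infer_instance

-- ===== CLAIM (what is proved, stated in full; the proofs are below) =====
def Claim_equal_distinctColoring : Prop := ∀ (N : Int) (r : List Int) (g : List Int) (b : List Int), Dom_distinctColoring N r g b → Pre_distinctColoring N r g b → Spec_distinctColoring N r g b (distinctColoring N r g b)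

-- ===== LEMMAS AND PROOFS =====

theorem pvAdd_assoc (a x y : Option Int) : pvAdd (pvAdd a x) y = pvAdd a (pvAdd x y) := by
  cases a <;> cases x <;> cases y <;> simp [pvAdd] <;> ring

theorem pvAdd_pvMin (a x y : Option Int) :
    pvAdd a (pvMin x y) = pvMin (pvAdd a x) (pvAdd a y) := by
  cases a <;> cases x <;> cases y <;> simp [pvAdd, pvMin] <;> omega

theorem pvMin_pvAdd (x y a : Option Int) :
    pvAdd (pvMin x y) a = pvMin (pvAdd x a) (pvAdd y a) := by
  cases a <;> cases x <;> cases y <;> simp [pvAdd, pvMin] <;> omega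

theorem pvMin_assoc (x y z : Option Int) : pvMin (pvMin x y) z = pvMin x (pvMin y z) := by
  cases x <;> cases y <;> cases z <;> simp [pvMin] <;> omega

theorem pvMin_comm (x y : Option Int) : pvMin x y = pvMin y x := by
  cases x <;> cases y <;> simp [pvMin] <;> omega

theorem pvMin_left_comm (x y z : Option Int) : pvMin x (pvMin y z) = pvMin y (pvMin x z) := by
  rw [← pvMin_assoc, pvMin_comm x y, pvMin_assoc]

-- vector-matrix associativity: v ⊗ (P ⊗ Q) = (v ⊗ P) ⊗ Q
theorem pvVMul_pvMul (v : pvRow) (P Q : pvMat) :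
    pvVMul v (pvMul P Q) = pvVMul (pvVMul v P) Q := by
  obtain ⟨v0, v1, v2⟩ := v
  obtain ⟨⟨p00, p01, p02⟩, ⟨p10, p11, p12⟩, ⟨p20, p21, p22⟩⟩ := P
  obtain ⟨⟨q00, q01, q02⟩, ⟨q10, q11, q12⟩, ⟨q20, q21, q22⟩⟩ := Q
  simp only [pvVMul, pvMul, pvMulRow, pvAdd_pvMin, pvMin_pvAdd, pvAdd_assoc]
  refine Prod.ext ?_ (Prod.ext ?_ ?_) <;>
    simp only [pvMin_assoc, pvMin_comm, pvMin_left_comm]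

theorem pvVMul_pvIdent (v : pvRow) : pvVMul v pvIdent = v := by
  obtain ⟨v0, v1, v2⟩ := v
  cases v0 <;> cases v1 <;> cases v2 <;> simp [pvVMul, pvMulRow, pvIdent, pvAdd, pvMin]

-- the D&C product applied to a vector is the left-to-right fold of the step matrices
theorem pvVMul_pvProd (r g b : List Int) :
    ∀ (n : Nat) (lo hi : Int), (hi - lo).toNat = n → ∀ (v : pvRow),
      pvVMul v (pvProd r g b lo hi)
        = (PySem.List.pyRange lo hi 1).foldl (fun w i => pvVMul w (pvStep r g b i)) v := by
  intro n
  induction n using Nat.strong_induction_on with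
  | _ n ih =>
    intro lo hi hn v
    rw [pvProd]
    by_cases h0 : hi - lo ≤ 0
    · simp [h0, pvVMul_pvIdent, PySem.List.pyRange_one_eq_nil (by omega : hi ≤ lo)]
    · by_cases h1 : hi - lo = 1
      · have : hi = lo + 1 := by omega
        simp [h0, h1, this, PySem.List.pyRange_one_singleton]
      · have hfd : PySem.Int.floordiv (hi - lo) 2 = (hi - lo) / 2 :=
          PySem.Int.floordiv_eq_ediv_of_pos (by omega)
        simp only [h0, h1, dif_neg, not_false_iff]
        rw [pvVMul_pvMul]
        rw [ih ((lo + PySem.Int.floordiv (hi - lo) 2) - lo).toNat (by rw [hfd]; omega)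
              lo _ rfl]
        rw [ih (hi - (lo + PySem.Int.floordiv (hi - lo) 2)).toNat (by rw [hfd]; omega)
              _ hi rfl]
        rw [PySem.List.pyRange_one_append lo (lo + PySem.Int.floordiv (hi - lo) 2) hi
              (by rw [hfd]; omega) (by rw [hfd]; omega), List.foldl_append]

-- on all-`some` vectors, one step of B's fold is exactly A's DP step
theorem pvVMul_pvStep (r g b : List Int) (i d0 d1 d2 : Int) :
    pvVMul (some d0, some d1, some d2) (pvStep r g b i)
      = (some (PySem.List.pyGetD r i 0 + min d1 d2),
         some (PySem.List.pyGetD g i 0 + min d0 d2),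
         some (PySem.List.pyGetD b i 0 + min d0 d1)) := by
  simp only [pvVMul, pvMulRow, pvStep, pvAdd, pvMin]
  refine Prod.ext ?_ (Prod.ext ?_ ?_) <;> simp <;> omega

-- B's fold over any index list stays all-`some` and carries A's DP triple
theorem fold_some (r g b : List Int) (idxs : List Int) :
    ∀ (d0 d1 d2 : Int),
      idxs.foldl (fun w i => pvVMul w (pvStep r g b i)) (some d0, some d1, some d2)
        = (fun dp : Int × Int × Int => ((some dp.1, some dp.2.1, some dp.2.2) : pvRow))
            (idxs.foldl
              (fun (dp : Int × Int × Int) i =>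
                (PySem.List.pyGetD r i 0 + min dp.2.1 dp.2.2,
                 PySem.List.pyGetD g i 0 + min dp.1 dp.2.2,
                 PySem.List.pyGetD b i 0 + min dp.1 dp.2.1)) (d0, d1, d2)) := by
  induction idxs with
  | nil => intro d0 d1 d2; rfl
  | cons i rest ih =>
    intro d0 d1 d2
    rw [List.foldl_cons, pvVMul_pvStep, ih, List.foldl_cons]

theorem distinctColoring_spec : Claim_equal_distinctColoring := by
  intro N r g b _ _
  unfold Spec_distinctColoring distinctColoring distinctColoring_alt
  simp only [pvVMul_pvProd r g b (N - 1).toNat 1 N (by omega), fold_some]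
  simp [pvMin]
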